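-- pv_equiv track=rewrite | github.com/Udonburo/pale-ale | tools/labels_from_cfa_spans.py | positive_token_indices
-- ===== SOURCE A (Python) =====
-- from typing import Any, Dict, List, Sequence, Tuple
--
-- def positive_token_indices(
--     token_spans: Sequence[Tuple[int, int]], defect_spans: Sequence[Tuple[int, int]]
-- ) -> List[int]:
--     idxs: List[int] = []
--     for i, (ts, te) in enumerate(token_spans):
--         if te <= ts:
--             continue
--         for ds, de in defect_spans:
--             if ts >= ds and te <= de:
--                 idxs.append(i)
--                 break
--     return idxs
-- ===== SOURCE B (Python) =====
-- from typing import List, Sequence, Tuple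
--
-- def positive_token_indices(
--     token_spans: Sequence[Tuple[int, int]], defect_spans: Sequence[Tuple[int, int]]
-- ) -> List[int]:
--     # Sort defects by start, keep prefix-max of ends, answer each token by binary search.
--     defects = sorted(defect_spans, key=lambda p: p[0])
--     starts = [d[0] for d in defects]
--     prefix_max = []
--     best = None
--     for _, de in defects:
--         if best is None or de > best:
--             best = de
--         prefix_max.append(best)
--     out: List[int] = []
--     for i, (ts, te) in enumerate(token_spans):
--         if te <= ts:
--             continue
--         lo, hi = 0, len(starts)
--         while lo < hi:  # bisect_right(starts, ts), hand-written: bisect may not be imported here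
--             mid = (lo + hi) // 2
--             if ts < starts[mid]:
--                 hi = mid
--             else:
--                 lo = mid + 1
--         if lo and prefix_max[lo - 1] >= te:
--             out.append(i)
--     return out
-- ===== Notes on version B (the rewrite author's own statement) =====
-- stated objective: faster
-- what changed: Replaces the per-token linear scan over all defect spans by sorting defects by start once, a prefix-maximum of their ends, and a binary search per token.
import Mathlib
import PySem

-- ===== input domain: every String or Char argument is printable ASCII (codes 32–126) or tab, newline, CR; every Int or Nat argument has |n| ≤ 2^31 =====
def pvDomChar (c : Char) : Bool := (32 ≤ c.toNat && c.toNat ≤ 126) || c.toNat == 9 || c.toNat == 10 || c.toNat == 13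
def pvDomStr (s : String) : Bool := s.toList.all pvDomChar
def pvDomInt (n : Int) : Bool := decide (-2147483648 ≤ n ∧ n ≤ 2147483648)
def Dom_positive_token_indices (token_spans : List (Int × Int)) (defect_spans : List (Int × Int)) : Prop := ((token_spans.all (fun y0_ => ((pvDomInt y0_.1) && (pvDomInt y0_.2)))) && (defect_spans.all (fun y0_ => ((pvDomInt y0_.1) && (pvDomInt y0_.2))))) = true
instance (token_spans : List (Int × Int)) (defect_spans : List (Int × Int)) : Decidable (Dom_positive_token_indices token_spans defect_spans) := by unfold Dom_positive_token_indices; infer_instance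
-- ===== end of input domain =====

-- B replaces A's per-token scan over all defect spans by sorting defects by start once,
-- a prefix-maximum of their ends, and a binary search per token; return values proved equal.


-- ===== PORT A =====
-- A's inner 'for ds, de in defect_spans: … break' loop
def innerScanA (ts te : Int) : List (Int × Int) → Bool
  | [] => false
  | (ds, de) :: rest => if ts ≥ ds ∧ te ≤ de then true else innerScanA ts te rest

def positive_token_indices (token_spans : List (Int × Int)) (defect_spans : List (Int × Int)) : List Int :=
  (PySem.List.enumerate token_spans).foldl (fun idxs p =>
    if p.2.2 ≤ p.2.1 then idxs
    else if innerScanA p.2.1 p.2.2 defect_spans then idxs ++ [p.1] else idxs) []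

-- ===== PORT B =====
def positive_token_indices_alt (token_spans : List (Int × Int)) (defect_spans : List (Int × Int)) : List Int :=
  let defects := PySem.List.sorted defect_spans Prod.fst
  let starts := defects.map Prod.fst
  -- the 'prefix_max' loop
  let prefix_max := (defects.foldl (fun (acc : List Int × Option Int) d =>
      let best : Int := match acc.2 with
        | none => d.2
        | some b => if d.2 > b then d.2 else b
      (acc.1 ++ [best], some best)) ([], none)).1
  (PySem.List.enumerate token_spans).foldl (fun out p =>
    if p.2.2 ≤ p.2.1 then out
    else
      -- hand-written bisect_right loop in Source B = PySem's bisectRight primitive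
      let lo := PySem.List.bisectRight starts p.2.1
      if lo ≠ 0 ∧ prefix_max.getD (lo - 1) 0 ≥ p.2.2 then out ++ [p.1] else out) []

-- ===== PRECONDITION & SPEC =====
def Spec_positive_token_indices (token_spans : List (Int × Int)) (defect_spans : List (Int × Int)) (out : List Int) : Prop := out = positive_token_indices_alt token_spans defect_spans
instance (token_spans : List (Int × Int)) (defect_spans : List (Int × Int)) (out : List Int) : Decidable (Spec_positive_token_indices token_spans defect_spans out) := by unfold Spec_positive_token_indices; infer_instance

-- ===== CLAIM (what is proved, stated in full; the proofs are below) =====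
def Claim_equal_positive_token_indices : Prop := ∀ (token_spans : List (Int × Int)) (defect_spans : List (Int × Int)), Dom_positive_token_indices token_spans defect_spans → Spec_positive_token_indices token_spans defect_spans (positive_token_indices token_spans defect_spans)

-- ===== LEMMAS AND PROOFS =====

-- A's inner scan is the existence of a covering defect span
theorem innerScanA_eq_true_iff (ts te : Int) (l : List (Int × Int)) :
    innerScanA ts te l = true ↔ ∃ p ∈ l, p.1 ≤ ts ∧ te ≤ p.2 := by
  induction l with
  | nil => simp [innerScanA]
  | cons d rest ih =>
      obtain ⟨ds, de⟩ := d
      by_cases h : ts ≥ ds ∧ te ≤ de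
      · simp [innerScanA, h]
      · simp only [innerScanA, if_neg h, ih, List.mem_cons]
        constructor
        · rintro ⟨p, hp, h2⟩; exact ⟨p, Or.inr hp, h2⟩
        · rintro ⟨p, hp | hp, h2⟩
          · cases hp; exact absurd ⟨h2.1, h2.2⟩ h
          · exact ⟨p, hp, h2⟩

-- running-max scan after the first element
def scanMax (b : Int) : List Int → List Int
  | [] => []
  | e :: es => (if e > b then e else b) :: scanMax (if e > b then e else b) es

theorem length_scanMax (b : Int) (es : List Int) : (scanMax b es).length = es.length := by
  induction es generalizing b with
  | nil => rfl
  | cons e es ih => simp [scanMax, ih]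

-- the prefix_max fold builds scanMax
theorem pm_foldl_eq (l : List (Int × Int)) (acc : List Int) (b : Int) :
    (l.foldl (fun (acc : List Int × Option Int) d =>
      let best : Int := match acc.2 with
        | none => d.2
        | some b => if d.2 > b then d.2 else b
      (acc.1 ++ [best], some best)) (acc, some b)).1 = acc ++ scanMax b (l.map Prod.snd) := by
  induction l generalizing acc b with
  | nil => simp [scanMax]
  | cons d rest ih => simp [scanMax, ih, List.append_assoc]

theorem pm_foldl_none_eq (l : List (Int × Int)) :
    (l.foldl (fun (acc : List Int × Option Int) d =>
      let best : Int := match acc.2 with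
        | none => d.2
        | some b => if d.2 > b then d.2 else b
      (acc.1 ++ [best], some best)) ([], none)).1 =
    match l with
    | [] => []
    | d :: rest => d.2 :: scanMax d.2 (rest.map Prod.snd) := by
  cases l with
  | nil => rfl
  | cons d rest =>
      show (rest.foldl _ ([] ++ [d.2], some d.2)).1 = _
      rw [pm_foldl_eq]
      rfl

theorem scanMax_getElem_le_iff (b : Int) (es : List Int) (k : Nat) (hk : k < es.length) (te : Int) :
    te ≤ (scanMax b es)[k]'(by rw [length_scanMax]; exact hk) ↔
      te ≤ b ∨ ∃ j, ∃ hj : j < es.length, j ≤ k ∧ te ≤ es[j] := by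
  induction es generalizing b k with
  | nil => simp at hk
  | cons e es ih =>
      cases k with
      | zero =>
          simp only [scanMax, List.getElem_cons_zero]
          constructor
          · intro h
            by_cases he : e > b
            · exact Or.inr ⟨0, by simp, by omega, by simpa [if_pos he] using h⟩
            · exact Or.inl (by simpa [if_neg he] using h)
          · rintro (h | ⟨j, hj, hjk, h⟩)
            · split_ifs with he <;> omega
            · interval_cases j
              simp only [List.getElem_cons_zero] at h
              split_ifs with he <;> omega
      | succ k =>
          have hk' : k < es.length := by simpa using hk
          simp only [scanMax, List.getElem_cons_succ]
          rw [ih _ k hk']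
          constructor
          · rintro (h | ⟨j, hj, hjk, h⟩)
            · by_cases he : e > b
              · exact Or.inr ⟨0, by simp, by omega, by simp; simp [if_pos he] at h; omega⟩
              · exact Or.inl (by simp [if_neg he] at h; omega)
            · exact Or.inr ⟨j + 1, by simpa using hj, by omega, by simpa using h⟩
          · rintro (h | ⟨j, hj, hjk, h⟩)
            · left; split_ifs with he <;> omega
            · cases j with
              | zero =>
                  left
                  simp only [List.getElem_cons_zero] at h
                  split_ifs with he <;> omega
              | succ j =>
                  right
                  exact ⟨j, by simpa using hj, by omega, by simpa using h⟩

-- B's per-token test equals A's existence test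
theorem token_test_iff (defect_spans : List (Int × Int)) (ts te : Int) :
    (PySem.List.bisectRight ((PySem.List.sorted defect_spans Prod.fst).map Prod.fst) ts ≠ 0 ∧
     ((PySem.List.sorted defect_spans Prod.fst).foldl (fun (acc : List Int × Option Int) d =>
        let best : Int := match acc.2 with
          | none => d.2
          | some b => if d.2 > b then d.2 else b
        (acc.1 ++ [best], some best)) ([], none)).1.getD
       (PySem.List.bisectRight ((PySem.List.sorted defect_spans Prod.fst).map Prod.fst) ts - 1) 0 ≥ te)
    ↔ ∃ p ∈ defect_spans, p.1 ≤ ts ∧ te ≤ p.2 := by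
  set defects := PySem.List.sorted defect_spans Prod.fst with hdefs
  set starts := defects.map Prod.fst with hstarts_def
  set prefix_max := (defects.foldl (fun (acc : List Int × Option Int) d =>
      let best : Int := match acc.2 with
        | none => d.2
        | some b => if d.2 > b then d.2 else b
      (acc.1 ++ [best], some best)) ([], none)).1 with hpm_def
  set lo := PySem.List.bisectRight starts ts with hlo_def
  clear_value lo prefix_max starts defects
  have hperm : defects.Perm defect_spans := by
    rw [hdefs]; exact PySem.List.sorted_perm defect_spans Prod.fst false
  have hsorted : List.Pairwise (fun a b : Int × Int => a.1 ≤ b.1) defects := by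
    rw [hdefs]; exact PySem.List.sorted_pairwise defect_spans Prod.fst
  have hstarts : List.Pairwise (· ≤ ·) starts := by
    rw [hstarts_def]; exact List.pairwise_map.mpr hsorted
  obtain ⟨hlo_le, hlt_lo, hge_lo⟩ := PySem.List.bisectRight_spec starts ts hstarts
  rw [← hlo_def] at hlo_le hlt_lo hge_lo
  have hlen : starts.length = defects.length := by rw [hstarts_def]; exact List.length_map ..
  -- reduce the RHS to an indexed existence over defects
  have hmem : (∃ p ∈ defect_spans, p.1 ≤ ts ∧ te ≤ p.2) ↔
      ∃ j, ∃ hj : j < defects.length, defects[j].1 ≤ ts ∧ te ≤ defects[j].2 := by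
    constructor
    · rintro ⟨p, hp, h⟩
      obtain ⟨j, hj, rfl⟩ := List.getElem_of_mem (hperm.mem_iff.mpr hp)
      exact ⟨j, hj, h⟩
    · rintro ⟨j, hj, h⟩
      exact ⟨defects[j], hperm.mem_iff.mp (List.getElem_mem hj), h⟩
  -- indexed existence ↔ an index below lo with a large enough end
  have hidx : (∃ j, ∃ hj : j < defects.length, defects[j].1 ≤ ts ∧ te ≤ defects[j].2) ↔
      ∃ j, ∃ hj : j < defects.length, j < lo ∧ te ≤ defects[j].2 := by
    constructor
    · rintro ⟨j, hj, h1, h2⟩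
      refine ⟨j, hj, ?_, h2⟩
      by_contra hge
      have := hge_lo j (by omega) (by omega)
      simp only [hstarts_def, List.getElem_map] at this
      omega
    · rintro ⟨j, hj, h1, h2⟩
      refine ⟨j, hj, ?_, h2⟩
      have := hlt_lo j (by omega) h1
      simpa only [hstarts_def, List.getElem_map] using this
  rw [hmem, hidx]
  -- finally relate to the prefix maximum
  cases hd : defects with
  | nil =>
      subst hd
      have : lo = 0 := by
        have := hlo_le; simp only [List.length_nil] at hlen; omega
      simp [this]
  | cons d rest =>
      subst hd
      have hpm : prefix_max = d.2 :: scanMax d.2 (rest.map Prod.snd) := by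
        rw [hpm_def]; exact pm_foldl_none_eq (d :: rest)
      have hdl : (d :: rest : List (Int × Int)).length = rest.length + 1 := by simp
      have hlen' : starts.length = rest.length + 1 := by rw [hlen]; exact hdl
      constructor
      · rintro ⟨hlo0, hge⟩
        rw [hpm] at hge
        cases hlo' : lo - 1 with
        | zero =>
            rw [hlo'] at hge
            refine ⟨0, by omega, by omega, ?_⟩
            simp only [List.getElem_cons_zero]
            simpa using hge
        | succ k =>
            have hk : k < (rest.map Prod.snd).length := by simp only [List.length_map]; omega
            rw [hlo'] at hge
            have hge' : te ≤ (scanMax d.2 (rest.map Prod.snd))[k]'(by rw [length_scanMax]; exact hk) := by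
              rw [← List.getD_eq_getElem _ 0 (by rw [length_scanMax]; exact hk)]
              simpa using hge
            rcases (scanMax_getElem_le_iff d.2 (rest.map Prod.snd) k hk te).mp hge' with h | ⟨j, hj, hjk, h⟩
            · refine ⟨0, by omega, by omega, ?_⟩
              simp only [List.getElem_cons_zero]
              exact h
            · refine ⟨j + 1, by simp only [List.length_map] at hj; omega, by omega, ?_⟩
              simp only [List.getElem_cons_succ]
              simpa using h
      · rintro ⟨j, hj, hjlo, hte⟩
        have hlo0 : lo ≠ 0 := by omega
        refine ⟨hlo0, ?_⟩
        rw [hpm]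
        cases hlo' : lo - 1 with
        | zero =>
            have hj0 : j = 0 := by omega
            subst hj0
            simp only [List.getElem_cons_zero] at hte
            simpa using hte
        | succ k =>
            have hk : k < (rest.map Prod.snd).length := by simp only [List.length_map]; omega
            rw [List.getD_cons_succ]
            rw [List.getD_eq_getElem _ 0 (by rw [length_scanMax]; exact hk)]
            apply (scanMax_getElem_le_iff d.2 (rest.map Prod.snd) k hk te).mpr
            cases j with
            | zero =>
                simp only [List.getElem_cons_zero] at hte
                exact Or.inl hte
            | succ j =>
                refine Or.inr ⟨j, by simp only [List.length_map]; omega, by omega, ?_⟩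
                simp only [List.getElem_cons_succ] at hte
                simpa using hte

-- ===== VERDICT (by name: the statement is the Claim_ definition above) =====
theorem positive_token_indices_spec : Claim_equal_positive_token_indices := by
  intro token_spans defect_spans _
  unfold Spec_positive_token_indices positive_token_indices positive_token_indices_alt
  dsimp only
  apply List.foldl_ext
  intro acc p _
  by_cases h1 : p.2.2 ≤ p.2.1
  · simp [h1]
  · simp only [if_neg h1]
    exact if_congr ((innerScanA_eq_true_iff p.2.1 p.2.2 defect_spans).trans
      (token_test_iff defect_spans p.2.1 p.2.2).symm) rfl rfl
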